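-- pv_equiv track=rewrite | github.com/gouravshaw2014/Automaton-Tools | Automata.py | convert
-- ===== SOURCE A (Python) =====
-- from collections import defaultdict, deque
--
-- def convert(T):
--     '''
--     Convert to CCA_T format for optimaized selction of next states
--         {('q0', 'a'): ((('=', 0), '+1', {'q1', 'q0'}), (('=', 1), '0', {'q1'})),
--         ('q0', 'b'): ((('>=', 0), '0', {'q0'}), (('>=', 0), '0', {'q1'})),
--         ('q1', 'a'): ((('>=', 0), '0', {'q1'}),),
--         ('q1', 'b'): ((('>=', 0), '0', {'q1'}),)}
--
--     '''
--     temp = defaultdict(set)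
--
--     # Merge transitions with same (state, symbol, condition, instruction)
--     for state, symbol, condition, instruction, next_states in T:
--         key = (state, symbol, condition, instruction)
--         temp[key].update(next_states)
--
--     # Convert to final CCA_T format
--     grouped = defaultdict(list)
--     for (state, symbol, condition, instruction), next_states in temp.items():
--         grouped[(state, symbol)].append((condition, instruction, next_states))
--
--     # Convert lists to tuples for consistency
--     for key in grouped:
--         grouped[key] = tuple(grouped[key])
--
--     return dict(grouped)
-- ===== SOURCE B (Python) =====
-- def convert(T):
--     # Dict-free grouping: for each (state, symbol) at its first appearance in T,
--     # brute-force scan T for its rows, list the distinct (condition, instruction)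
--     # pairs in first-appearance order, and union the matching next-state sets.
--     result = {}
--     for state, symbol, _cond, _instr, _ns in T:
--         if (state, symbol) in result:
--             continue
--         rows = [(c, d, ns) for a, b, c, d, ns in T if (a, b) == (state, symbol)]
--         group_keys = []
--         for c, d, _ in rows:
--             if (c, d) not in group_keys:
--                 group_keys.append((c, d))
--         entries = []
--         for c, d in group_keys:
--             states = set()
--             for c2, d2, ns in rows:
--                 if (c2, d2) == (c, d):
--                     states.update(ns)
--             entries.append((c, d, states))
--         result[(state, symbol)] = tuple(entries)
--     return result
-- ===== Notes on version B (the rewrite author's own statement) =====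
-- stated objective: alternative
-- what changed: Replaces A's hash-based grouping (a flat defaultdict keyed by the 4-tuple, then a regrouping pass over its items) with a dict-free brute-force method: for each (state,symbol) at its first appearance it rescans T for that key's rows, collects the distinct (condition,instruction) pairs by list membership in first-appearance order, and unions matching next-state sets by another scan; trades A's linear dict passes for quadratic nested scans.
import Mathlib
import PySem

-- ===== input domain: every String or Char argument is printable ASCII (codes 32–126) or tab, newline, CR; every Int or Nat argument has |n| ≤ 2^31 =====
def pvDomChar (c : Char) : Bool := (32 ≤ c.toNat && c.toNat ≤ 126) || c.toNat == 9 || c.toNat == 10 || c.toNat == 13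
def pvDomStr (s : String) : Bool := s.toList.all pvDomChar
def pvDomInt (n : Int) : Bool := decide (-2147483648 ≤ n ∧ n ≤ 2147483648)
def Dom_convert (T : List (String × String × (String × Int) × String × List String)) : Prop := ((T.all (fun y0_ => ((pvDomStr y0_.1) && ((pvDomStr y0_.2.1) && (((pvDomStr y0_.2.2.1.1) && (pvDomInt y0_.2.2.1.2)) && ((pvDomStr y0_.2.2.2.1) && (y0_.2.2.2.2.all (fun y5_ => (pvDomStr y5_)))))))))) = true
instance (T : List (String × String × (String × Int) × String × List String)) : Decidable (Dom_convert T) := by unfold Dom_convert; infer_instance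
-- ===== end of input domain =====

-- B replaces A's hash-based grouping (flat 4-key defaultdict + regrouping pass) by dict-free
-- brute-force nested scans per first-appearing (state,symbol): alternative algorithm, not faster.

-- ===== PORT A =====
-- temp = defaultdict(set); temp[(state,symbol,condition,instruction)].update(next_states)
def convertTemp (T : List (String × String × (String × Int) × String × List String)) :
    PySem.Dict (String × String × (String × Int) × String) (PySem.Set String) :=
  T.foldl (fun d t => d.modify (t.1, t.2.1, t.2.2.1, t.2.2.2.1) PySem.Set.empty
    (fun s => PySem.Set.update s t.2.2.2.2)) PySem.Dict.empty

-- grouped = defaultdict(list); grouped[(state,symbol)].append((condition,instruction,next_states))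
def convertGrouped (T : List (String × String × (String × Int) × String × List String)) :
    PySem.Dict (String × String) (List ((String × Int) × String × List String)) :=
  (convertTemp T).items.foldl (fun g p => g.modify (p.1.1, p.1.2.1) []
    (fun l => l ++ [(p.1.2.2.1, p.1.2.2.2, p.2)])) PySem.Dict.empty

-- for key in grouped: grouped[key] = tuple(grouped[key])  (tuple = List under the type convention)
def convert (T : List (String × String × (String × Int) × String × List String)) :
    List (String × String × List ((String × Int) × String × List String)) :=
  ((convertGrouped T).keys.foldl (fun g k => g.insert k (g.getD k [])) (convertGrouped T)).items.map
    (fun p => (p.1.1, p.1.2, p.2))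

-- ===== PORT B =====
-- rows = [(c, d, ns) for a, b, c, d, ns in T if (a, b) == (state, symbol)]
def rowsFor (c : String × String) (T : List (String × String × (String × Int) × String × List String)) :
    List ((String × Int) × String × List String) :=
  (T.filter (fun t => (t.1, t.2.1) = c)).map (fun t => (t.2.2.1, t.2.2.2.1, t.2.2.2.2))

-- group_keys = []; for c, d, _ in rows: if (c, d) not in group_keys: group_keys.append((c, d))
def groupKeysFor (rows : List ((String × Int) × String × List String)) : List ((String × Int) × String) :=
  rows.foldl (fun ks r => if (r.1, r.2.1) ∈ ks then ks else ks ++ [(r.1, r.2.1)]) []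

-- states = set(); for c2, d2, ns in rows: if (c2, d2) == (c, d): states.update(ns)
def statesFor (q : (String × Int) × String) (rows : List ((String × Int) × String × List String)) :
    PySem.Set String :=
  rows.foldl (fun s r => if (r.1, r.2.1) = q then PySem.Set.update s r.2.2 else s) PySem.Set.empty

-- entries = [(c, d, states) for (c, d) in group_keys]
def entriesFor (c : String × String) (T : List (String × String × (String × Int) × String × List String)) :
    List ((String × Int) × String × List String) :=
  (groupKeysFor (rowsFor c T)).map (fun q => (q.1, q.2, statesFor q (rowsFor c T)))

-- the outer loop: result[(state,symbol)] = tuple(entries) at first appearance, skip otherwise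
def altFold (l full : List (String × String × (String × Int) × String × List String)) :
    PySem.Dict (String × String) (List ((String × Int) × String × List String)) :=
  l.foldl (fun res t => if res.contains (t.1, t.2.1) then res
    else res.insert (t.1, t.2.1) (entriesFor (t.1, t.2.1) full)) PySem.Dict.empty

def convert_alt (T : List (String × String × (String × Int) × String × List String)) :
    List (String × String × List ((String × Int) × String × List String)) :=
  (altFold T T).items.map (fun p => (p.1.1, p.1.2, p.2))

-- ===== PRECONDITION & SPEC =====
def Spec_convert (T : List (String × String × (String × Int) × String × List String)) (out : List (String × String × List ((String × Int) × String × List String))) : Prop := out = convert_alt T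
instance (T : List (String × String × (String × Int) × String × List String)) (out : List (String × String × List ((String × Int) × String × List String))) : Decidable (Spec_convert T out) := by
  unfold Spec_convert
  letI i1 : DecidableEq (List ((String × Int) × String × List String)) := instDecidableEqList
  letI i2 : DecidableEq (String × String × List ((String × Int) × String × List String)) := instDecidableEqProd
  letI i3 : DecidableEq (List (String × String × List ((String × Int) × String × List String))) := instDecidableEqList
  exact i3 _ _

-- ===== CLAIM (what is proved, stated in full; the proofs are below) =====
def Claim_equal_convert : Prop := ∀ (T : List (String × String × (String × Int) × String × List String)), Dom_convert T → Spec_convert T (convert T)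

-- ===== LEMMAS AND PROOFS =====

-- the inner dict A's temp induces for one (state,symbol) key c (proof-only helper)
def innerDict (c : String × String) (T : List (String × String × (String × Int) × String × List String)) :
    PySem.Dict ((String × Int) × String) (PySem.Set String) :=
  (T.filter (fun t => decide ((t.1, t.2.1) = c))).foldl
    (fun inner t => inner.modify (t.2.2.1, t.2.2.2.1) PySem.Set.empty
      (fun s => PySem.Set.update s t.2.2.2.2)) PySem.Dict.empty

-- a fold of per-key modifies, read back at one key c: only the matching elements act
theorem getD_foldl_modify_key {α κ ν : Type} [BEq κ] [LawfulBEq κ] [DecidableEq κ]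
    (l : List α) (key : α → κ) (f : α → ν → ν) (d0 : ν) (d : PySem.Dict κ ν) (c : κ) :
    (l.foldl (fun d x => d.modify (key x) d0 (f x)) d).getD c d0
      = (l.filter (fun x => key x = c)).foldl (fun v x => f x v) (d.getD c d0) := by
  induction l generalizing d with
  | nil => rfl
  | cons x l ih =>
    simp only [List.foldl_cons, List.filter_cons]
    rw [ih]
    by_cases h : key x = c
    · simp [h]
    · simp [h, PySem.Dict.getD_modify, Ne.symm h]

-- ofList commutes with filter (first-occurrence dedup of a filtered list)
theorem set_ofList_filter {α : Type} [BEq α] [LawfulBEq α] (p : α → Bool) (xs : List α) :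
    (PySem.Set.ofList xs).filter p = PySem.Set.ofList (xs.filter p) := by
  induction xs using List.reverseRecOn with
  | nil => rfl
  | append_singleton xs x ih =>
    have hof : ∀ (ys : List α), PySem.Set.ofList (ys ++ [x]) = PySem.Set.add (PySem.Set.ofList ys) x := by
      intro ys; simp [PySem.Set.ofList, List.foldl_append]
    rw [List.filter_append, hof]
    by_cases hm : x ∈ PySem.Set.ofList xs
    · have hx : x ∈ xs := (PySem.Set.mem_ofList xs x).1 hm
      rw [PySem.Set.add_of_mem hm]
      by_cases hp : p x
      · have : x ∈ PySem.Set.ofList (xs.filter p) :=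
          (PySem.Set.mem_ofList _ x).2 (List.mem_filter.2 ⟨hx, hp⟩)
        simp [hp, hof, PySem.Set.add_of_mem this, ih]
      · simp [hp, ih]
    · rw [PySem.Set.add_of_not_mem hm, List.filter_append, ih]
      by_cases hp : p x
      · have hnx : x ∉ PySem.Set.ofList (xs.filter p) := by
          intro hc
          exact hm ((PySem.Set.mem_ofList xs x).2 (List.mem_filter.1 ((PySem.Set.mem_ofList _ x).1 hc)).1)
        simp [hp, hof, PySem.Set.add_of_not_mem hnx]
      · simp [hp]

-- dedup-then-map-then-dedup = map-then-dedup
theorem set_ofList_map_ofList {α β : Type} [BEq α] [LawfulBEq α] [BEq β] [LawfulBEq β]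
    (g : α → β) (xs : List α) :
    PySem.Set.ofList ((PySem.Set.ofList xs).map g) = PySem.Set.ofList (xs.map g) := by
  induction xs using List.reverseRecOn with
  | nil => rfl
  | append_singleton xs x ih =>
    have hof : ∀ {γ : Type} [BEq γ] (ys : List γ) (y : γ),
        PySem.Set.ofList (ys ++ [y]) = PySem.Set.add (PySem.Set.ofList ys) y := by
      intro γ _ ys y; simp [PySem.Set.ofList, List.foldl_append]
    by_cases hm : x ∈ PySem.Set.ofList xs
    · have hgx : g x ∈ PySem.Set.ofList (List.map g xs) :=
        (PySem.Set.mem_ofList _ _).2 (List.mem_map_of_mem ((PySem.Set.mem_ofList xs x).1 hm))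
      rw [hof, PySem.Set.add_of_mem hm, ih, List.map_append, List.map_cons, List.map_nil, hof,
        PySem.Set.add_of_mem hgx]
    · rw [hof, PySem.Set.add_of_not_mem hm, List.map_append, List.map_cons, List.map_nil, hof,
        List.map_append, List.map_cons, List.map_nil, hof, ih]

-- mapping an injective embedding commutes with ofList
theorem set_ofList_map_inj {α β : Type} [BEq α] [LawfulBEq α] [BEq β] [LawfulBEq β]
    (g : α → β) (hg : Function.Injective g) (xs : List α) :
    PySem.Set.ofList (xs.map g) = (PySem.Set.ofList xs).map g := by
  induction xs using List.reverseRecOn with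
  | nil => rfl
  | append_singleton xs x ih =>
    have hof : ∀ {γ : Type} [BEq γ] (ys : List γ) (y : γ),
        PySem.Set.ofList (ys ++ [y]) = PySem.Set.add (PySem.Set.ofList ys) y := by
      intro γ _ ys y; simp [PySem.Set.ofList, List.foldl_append]
    rw [List.map_append, List.map_cons, List.map_nil, hof, hof, ih]
    by_cases hm : x ∈ PySem.Set.ofList xs
    · have hgx : g x ∈ (PySem.Set.ofList xs).map g := List.mem_map_of_mem hm
      rw [PySem.Set.add_of_mem hgx, PySem.Set.add_of_mem hm]
    · have hgx : g x ∉ (PySem.Set.ofList xs).map g := by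
        intro hc
        obtain ⟨y, hy, hgy⟩ := List.mem_map.1 hc
        exact hm (hg hgy ▸ hy)
      rw [PySem.Set.add_of_not_mem hgx, PySem.Set.add_of_not_mem hm, List.map_append,
        List.map_cons, List.map_nil]

-- re-inserting a present key with its own value is the identity
theorem insert_getD_self {κ ν : Type} [BEq κ] [LawfulBEq κ]
    (d : PySem.Dict κ ν) (k : κ) (d0 : ν) (hc : d.contains k = true) (hnd : d.keys.Nodup) :
    d.insert k (d.getD k d0) = d := by
  apply PySem.Dict.ext
  rw [PySem.Dict.items_insert_of_contains d _ hc]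
  conv_rhs => rw [← List.map_id d.items]
  apply List.map_congr_left
  intro p hp
  by_cases h : p.1 = k
  · have hpk : (k, p.2) ∈ d.items := by rw [← h]; exact hp
    have hv := PySem.Dict.getD_of_mem_items d hpk hnd d0
    simp [h, hv, Prod.ext_iff]
  · simp [h]

-- a fold whose every step fixes the accumulator is the identity
theorem foldl_fixed {α β : Type} (l : List α) (f : β → α → β) (a : β)
    (h : ∀ x ∈ l, f a x = a) : l.foldl f a = a := by
  induction l with
  | nil => rfl
  | cons x l ih =>
    rw [List.foldl_cons, h x (List.mem_cons_self), ih]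
    intro y hy; exact h y (List.mem_cons_of_mem _ hy)

-- ---- characterisations of A's two dicts ----

theorem temp_keys (T : List (String × String × (String × Int) × String × List String)) :
    (convertTemp T).keys
      = PySem.Set.ofList (T.map (fun t => (t.1, t.2.1, t.2.2.1, t.2.2.2.1))) := by
  unfold convertTemp
  rw [PySem.Dict.keys_foldl_modify_key T (fun t => (t.1, t.2.1, t.2.2.1, t.2.2.2.1))
    PySem.Set.empty (fun _ t => fun s => PySem.Set.update s t.2.2.2.2) PySem.Dict.empty]
  rfl

theorem temp_nodup (T : List (String × String × (String × Int) × String × List String)) :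
    (convertTemp T).keys.Nodup := by
  unfold convertTemp
  exact PySem.Dict.nodup_keys_foldl_modify_key T (fun t => (t.1, t.2.1, t.2.2.1, t.2.2.2.1))
    PySem.Set.empty (fun _ t => fun s => PySem.Set.update s t.2.2.2.2) PySem.Dict.empty
    PySem.Dict.nodup_keys_empty

theorem temp_getD (T : List (String × String × (String × Int) × String × List String))
    (k : String × String × (String × Int) × String) :
    (convertTemp T).getD k PySem.Set.empty
      = (T.filter (fun t => (t.1, t.2.1, t.2.2.1, t.2.2.2.1) = k)).foldl
          (fun s t => PySem.Set.update s t.2.2.2.2) PySem.Set.empty := by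
  unfold convertTemp
  rw [getD_foldl_modify_key T (fun t => (t.1, t.2.1, t.2.2.1, t.2.2.2.1))
    (fun t s => PySem.Set.update s t.2.2.2.2) PySem.Set.empty PySem.Dict.empty k]
  rw [PySem.Dict.getD_empty]

theorem grouped_keys (T : List (String × String × (String × Int) × String × List String)) :
    (convertGrouped T).keys = PySem.Set.ofList (T.map (fun t => (t.1, t.2.1))) := by
  unfold convertGrouped
  rw [PySem.Dict.keys_foldl_modify_key (convertTemp T).items (fun p => (p.1.1, p.1.2.1))
    [] (fun _ p => fun l => l ++ [(p.1.2.2.1, p.1.2.2.2, p.2)]) PySem.Dict.empty]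
  have h1 : (convertTemp T).items.map (fun p => (p.1.1, p.1.2.1))
      = (convertTemp T).keys.map (fun k => (k.1, k.2.1)) := by
    simp [PySem.Dict.keys, List.map_map, Function.comp]
  have h2 : PySem.Set.update (PySem.Dict.empty
      (κ := String × String) (ν := List ((String × Int) × String × List String))).keys
      ((convertTemp T).items.map (fun p => (p.1.1, p.1.2.1)))
      = PySem.Set.ofList ((convertTemp T).items.map (fun p => (p.1.1, p.1.2.1))) := rfl
  rw [h2, h1, temp_keys, set_ofList_map_ofList, List.map_map]
  rfl

theorem grouped_nodup (T : List (String × String × (String × Int) × String × List String)) :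
    (convertGrouped T).keys.Nodup := by
  unfold convertGrouped
  exact PySem.Dict.nodup_keys_foldl_modify_key (convertTemp T).items (fun p => (p.1.1, p.1.2.1))
    [] (fun _ p => fun l => l ++ [(p.1.2.2.1, p.1.2.2.2, p.2)]) PySem.Dict.empty
    PySem.Dict.nodup_keys_empty

theorem grouped_getD (T : List (String × String × (String × Int) × String × List String))
    (c : String × String) :
    (convertGrouped T).getD c []
      = ((convertTemp T).items.filter (fun p => (p.1.1, p.1.2.1) = c)).map
          (fun p => (p.1.2.2.1, p.1.2.2.2, p.2)) := by
  unfold convertGrouped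
  rw [getD_foldl_modify_key (convertTemp T).items (fun p => (p.1.1, p.1.2.1))
    (fun p l => l ++ [(p.1.2.2.1, p.1.2.2.2, p.2)]) [] PySem.Dict.empty c]
  rw [PySem.Dict.getD_empty]
  exact (PySem.List.foldl_append_singleton_eq_map
    (fun p : (String × String × (String × Int) × String) × PySem.Set String =>
      (p.1.2.2.1, p.1.2.2.2, p.2)) _ []).trans (List.nil_append _)

-- ---- characterisation of A's temp sliced at one (state,symbol) key via innerDict ----

theorem inner_keys (c : String × String)
    (T : List (String × String × (String × Int) × String × List String)) :
    (innerDict c T).keys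
      = PySem.Set.ofList ((T.filter (fun t => (t.1, t.2.1) = c)).map
          (fun t => (t.2.2.1, t.2.2.2.1))) := by
  unfold innerDict
  rw [PySem.Dict.keys_foldl_modify_key (T.filter (fun t => decide ((t.1, t.2.1) = c)))
    (fun t => (t.2.2.1, t.2.2.2.1)) PySem.Set.empty
    (fun _ t => fun s => PySem.Set.update s t.2.2.2.2) PySem.Dict.empty]
  rfl

theorem inner_nodup (c : String × String)
    (T : List (String × String × (String × Int) × String × List String)) :
    (innerDict c T).keys.Nodup := by
  unfold innerDict
  exact PySem.Dict.nodup_keys_foldl_modify_key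
    (T.filter (fun t => decide ((t.1, t.2.1) = c))) (fun t => (t.2.2.1, t.2.2.2.1))
    PySem.Set.empty (fun _ t => fun s => PySem.Set.update s t.2.2.2.2) PySem.Dict.empty
    PySem.Dict.nodup_keys_empty

theorem inner_getD (c : String × String)
    (T : List (String × String × (String × Int) × String × List String))
    (q : (String × Int) × String) :
    (innerDict c T).getD q PySem.Set.empty
      = ((T.filter (fun t => (t.1, t.2.1) = c)).filter
          (fun t => (t.2.2.1, t.2.2.2.1) = q)).foldl
          (fun s t => PySem.Set.update s t.2.2.2.2) PySem.Set.empty := by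
  unfold innerDict
  rw [getD_foldl_modify_key (T.filter (fun t => decide ((t.1, t.2.1) = c)))
    (fun t => (t.2.2.1, t.2.2.2.1)) (fun t s => PySem.Set.update s t.2.2.2.2)
    PySem.Set.empty PySem.Dict.empty q]
  rw [PySem.Dict.getD_empty]

-- the two read-outs agree at every leaf: flat 4-key read-out equals the nested read-out
theorem temp_inner_agree (T : List (String × String × (String × Int) × String × List String))
    (c : String × String) (q : (String × Int) × String) :
    (convertTemp T).getD (c.1, c.2, q.1, q.2) PySem.Set.empty
      = (innerDict c T).getD q PySem.Set.empty := by
  rw [temp_getD, inner_getD, List.filter_filter]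
  congr 1
  apply List.filter_congr
  intro t _
  simp only [← Bool.decide_and, decide_eq_decide, Prod.ext_iff]
  tauto

-- per (state,symbol) key c, A's grouped list equals innerDict flattened
theorem grouped_inner_agree (T : List (String × String × (String × Int) × String × List String))
    (c : String × String) :
    (convertGrouped T).getD c []
      = (innerDict c T).items.map (fun q => (q.1.1, q.1.2, q.2)) := by
  have hinj : Function.Injective
      (fun q : (String × Int) × String => (c.1, c.2, q.1, q.2)) := by
    intro a b hab
    simpa [Prod.ext_iff] using hab
  have step1 : (convertGrouped T).getD c []
      = ((convertTemp T).keys.filter (fun k => decide ((k.1, k.2.1) = c))).map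
          (fun k => (k.2.2.1, k.2.2.2, (convertTemp T).getD k PySem.Set.empty)) := by
    rw [grouped_getD]
    rw [PySem.Dict.items_eq_map_keys (convertTemp T) (temp_nodup T) PySem.Set.empty]
    rw [List.filter_map, List.map_map]
    rfl
  have step2 : (convertTemp T).keys.filter (fun k => decide ((k.1, k.2.1) = c))
      = (PySem.Set.ofList ((T.filter (fun t => decide ((t.1, t.2.1) = c))).map
          (fun t => (t.2.2.1, t.2.2.2.1)))).map (fun q => (c.1, c.2, q.1, q.2)) := by
    rw [temp_keys, set_ofList_filter, List.filter_map]
    have hfe : T.filter ((fun (k : String × String × (String × Int) × String) =>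
        decide ((k.1, k.2.1) = c)) ∘ (fun t => (t.1, t.2.1, t.2.2.1, t.2.2.2.1)))
        = T.filter (fun t => decide ((t.1, t.2.1) = c)) := rfl
    rw [hfe]
    have hmap : (T.filter (fun t => decide ((t.1, t.2.1) = c))).map
        (fun t => (t.1, t.2.1, t.2.2.1, t.2.2.2.1))
        = ((T.filter (fun t => decide ((t.1, t.2.1) = c))).map
            (fun t => (t.2.2.1, t.2.2.2.1))).map (fun q => (c.1, c.2, q.1, q.2)) := by
      rw [List.map_map]
      apply List.map_congr_left
      intro t ht
      have h := (List.mem_filter.1 ht).2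
      rw [decide_eq_true_eq] at h
      have h1 : t.1 = c.1 := by rw [← h]
      have h2 : t.2.1 = c.2 := by rw [← h]
      simp [Function.comp, h1, h2]
    rw [hmap, set_ofList_map_inj _ hinj]
  rw [step1, step2, List.map_map]
  rw [PySem.Dict.items_eq_map_keys (innerDict c T) (inner_nodup c T) PySem.Set.empty,
    inner_keys, List.map_map]
  apply List.map_congr_left
  intro q _
  exact congrArg (fun s => (q.1, q.2, s)) (temp_inner_agree T c q)

-- ---- characterisations of B's pieces ----

-- B's membership-dedup loop is first-occurrence dedup (Set.ofList) of the mapped keys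
theorem groupKeys_eq_ofList (rows : List ((String × Int) × String × List String)) :
    groupKeysFor rows = PySem.Set.ofList (rows.map (fun r => (r.1, r.2.1))) := by
  unfold groupKeysFor
  have h : ∀ (l : List ((String × Int) × String × List String))
      (s : PySem.Set ((String × Int) × String)),
      l.foldl (fun ks r => if (r.1, r.2.1) ∈ ks then ks else ks ++ [(r.1, r.2.1)]) s
        = PySem.Set.update s (l.map (fun r => (r.1, r.2.1))) := by
    intro l
    induction l with
    | nil => intro s; rfl
    | cons x l ih =>
      intro s
      rw [List.foldl_cons, List.map_cons]
      have hstep : (if (x.1, x.2.1) ∈ s then s else s ++ [(x.1, x.2.1)])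
          = PySem.Set.add s (x.1, x.2.1) := by
        by_cases hm : (x.1, x.2.1) ∈ s
        · rw [if_pos hm, PySem.Set.add_of_mem hm]
        · rw [if_neg hm, PySem.Set.add_of_not_mem hm]
      rw [hstep, ih]
      rfl
  exact h rows []

-- a fold with an if-guard equals the fold over the filtered list
theorem foldl_guard_filter {α β : Type} (l : List α) (p : α → Prop) [DecidablePred p]
    (f : β → α → β) (b : β) :
    l.foldl (fun x y => if p y then f x y else x) b
      = (l.filter (fun y => decide (p y))).foldl f b := by
  induction l generalizing b with
  | nil => rfl
  | cons x l ih =>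
    rw [List.foldl_cons, List.filter_cons]
    by_cases h : p x
    · simp only [h, if_true, decide_eq_true_eq]
      rw [List.foldl_cons]
      exact ih (f b x)
    · simp only [h, if_false, decide_eq_true_eq]
      exact ih b

-- B's if-guarded union fold equals the filtered fold
theorem statesFor_eq (c : String × String)
    (T : List (String × String × (String × Int) × String × List String))
    (q : (String × Int) × String) :
    statesFor q (rowsFor c T) = (innerDict c T).getD q PySem.Set.empty := by
  unfold statesFor rowsFor
  rw [inner_getD, List.foldl_map, foldl_guard_filter]

-- B's entries for key c = innerDict flattened
theorem entriesFor_eq (c : String × String)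
    (T : List (String × String × (String × Int) × String × List String)) :
    entriesFor c T = (innerDict c T).items.map (fun q => (q.1.1, q.1.2, q.2)) := by
  unfold entriesFor
  rw [PySem.Dict.items_eq_map_keys (innerDict c T) (inner_nodup c T) PySem.Set.empty,
    inner_keys, List.map_map]
  rw [groupKeys_eq_ofList]
  unfold rowsFor
  rw [List.map_map]
  have hmaps : (T.filter (fun t => (t.1, t.2.1) = c)).map
      ((fun r : ((String × Int) × String × List String) => (r.1, r.2.1)) ∘
        (fun t => (t.2.2.1, t.2.2.2.1, t.2.2.2.2)))
      = (T.filter (fun t => (t.1, t.2.1) = c)).map (fun t => (t.2.2.1, t.2.2.2.1)) := rfl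
  rw [hmaps]
  apply List.map_congr_left
  intro q _
  exact congrArg (fun s => (q.1, q.2, s)) (statesFor_eq c T q)

-- B's skip-or-insert fold: items are the first occurrences of the keys, each paired with entriesFor
theorem altFold_items (l full : List (String × String × (String × Int) × String × List String)) :
    (altFold l full).items
      = (PySem.Set.ofList (l.map (fun t => (t.1, t.2.1)))).map
          (fun c => (c, entriesFor c full)) := by
  unfold altFold
  induction l using List.reverseRecOn with
  | nil => rfl
  | append_singleton l x ih =>
    rw [List.foldl_append, List.foldl_cons, List.foldl_nil, List.map_append, List.map_cons,
      List.map_nil]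
    have hof : PySem.Set.ofList (l.map (fun t => (t.1, t.2.1)) ++ [(x.1, x.2.1)])
        = PySem.Set.add (PySem.Set.ofList (l.map (fun t => (t.1, t.2.1)))) (x.1, x.2.1) := by
      simp [PySem.Set.ofList, List.foldl_append]
    set D := l.foldl (fun res t => if res.contains (t.1, t.2.1) then res
      else res.insert (t.1, t.2.1) (entriesFor (t.1, t.2.1) full)) PySem.Dict.empty with hD
    have hkeys : D.keys = PySem.Set.ofList (l.map (fun t => (t.1, t.2.1))) := by
      have : D.keys = D.items.map Prod.fst := by simp [PySem.Dict.keys]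
      rw [this, ih, List.map_map]
      have h2 : (Prod.fst ∘ fun c => (c, entriesFor c full)) = id := rfl
      rw [h2, List.map_id]
    by_cases hm : (x.1, x.2.1) ∈ PySem.Set.ofList (l.map (fun t => (t.1, t.2.1)))
    · have hc : D.contains (x.1, x.2.1) = true :=
        (PySem.Dict.contains_iff_mem_keys D (x.1, x.2.1)).2 (hkeys ▸ hm)
      rw [hof, PySem.Set.add_of_mem hm, hc]
      simpa using ih
    · have hc : D.contains (x.1, x.2.1) = false := by
        cases hcc : D.contains (x.1, x.2.1) with
        | false => rfl
        | true => exact absurd (hkeys ▸ (PySem.Dict.contains_iff_mem_keys D (x.1, x.2.1)).1 hcc) hm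
      rw [hof, PySem.Set.add_of_not_mem hm, hc]
      simp only [Bool.false_eq_true, if_false]
      rw [PySem.Dict.items_insert_of_not_contains D _ hc, ih, List.map_append]
      rfl

theorem convert_spec_aux : ∀ (T : List (String × String × (String × Int) × String × List String)),
    convert T = convert_alt T := by
  intro T
  unfold convert convert_alt
  have hfinal : ((convertGrouped T).keys.foldl (fun g k => g.insert k (g.getD k []))
      (convertGrouped T)) = convertGrouped T := by
    apply foldl_fixed
    intro k hk
    exact insert_getD_self _ k [] ((PySem.Dict.contains_iff_mem_keys _ k).2 hk) (grouped_nodup T)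
  rw [hfinal]
  rw [PySem.Dict.items_eq_map_keys (convertGrouped T) (grouped_nodup T) []]
  rw [altFold_items T T]
  rw [List.map_map, List.map_map, grouped_keys]
  apply List.map_congr_left
  intro c _
  simp only [Function.comp]
  rw [grouped_inner_agree, ← entriesFor_eq]

-- ===== VERDICT (by name: the statement is the Claim_ definition above) =====
theorem convert_spec : Claim_equal_convert := by
  intro T _
  exact convert_spec_aux T
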